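-- pv_equiv track=rewrite | github.com/ljh-081210/lambda_ai | mobilenet_lambda/lambda_edge/viewer_response.py | rotate_pixels
-- ===== SOURCE A (Python) =====
-- def rotate_pixels(pixels, w, h, degrees):
--     degrees = int(degrees) % 360
--     if degrees == 0:
--         return pixels, w, h
--     elif degrees == 90:
--         new_w, new_h = h, w
--         new = [pixels[(h - 1 - nx) * w + ny]
--                for ny in range(new_h) for nx in range(new_w)]
--         return new, new_w, new_h
--     elif degrees == 180:
--         return list(reversed(pixels)), w, h
--     elif degrees == 270:
--         new_w, new_h = h, w
--         new = [pixels[nx * w + (w - 1 - ny)]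
--                for ny in range(new_h) for nx in range(new_w)]
--         return new, new_w, new_h
--     return pixels, w, h
-- ===== SOURCE B (Python) =====
-- def rotate_pixels(pixels, w, h, degrees):
--     degrees = int(degrees) % 360
--     if degrees == 0:
--         return pixels, w, h
--     if degrees == 180:
--         return list(reversed(pixels)), w, h
--     if degrees == 90 or degrees == 270:
--         rows = [pixels[r * w:(r + 1) * w] for r in range(h)]
--         if degrees == 90:
--             out = [p for col in zip(*reversed(rows)) for p in col]
--         else:
--             out = [p for col in reversed(list(zip(*rows))) for p in col]
--         return out, h, w
--     return pixels, w, h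
-- ===== Notes on version B (the rewrite author's own statement) =====
-- stated objective: idiomatic
-- what changed: B reshapes the flat array into rows by slicing and computes the 90/270 rotations as matrix transforms (transpose via zip(*...) plus row/column reversal, then flatten), instead of A's per-pixel double comprehension over index formulas.
-- outside the precondition, e.g. on rotate_pixels([1, 2, 3], -1, 1, 90): A returns ([], 1, -1), B returns ([1, 2], 1, -1)
import Mathlib
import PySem

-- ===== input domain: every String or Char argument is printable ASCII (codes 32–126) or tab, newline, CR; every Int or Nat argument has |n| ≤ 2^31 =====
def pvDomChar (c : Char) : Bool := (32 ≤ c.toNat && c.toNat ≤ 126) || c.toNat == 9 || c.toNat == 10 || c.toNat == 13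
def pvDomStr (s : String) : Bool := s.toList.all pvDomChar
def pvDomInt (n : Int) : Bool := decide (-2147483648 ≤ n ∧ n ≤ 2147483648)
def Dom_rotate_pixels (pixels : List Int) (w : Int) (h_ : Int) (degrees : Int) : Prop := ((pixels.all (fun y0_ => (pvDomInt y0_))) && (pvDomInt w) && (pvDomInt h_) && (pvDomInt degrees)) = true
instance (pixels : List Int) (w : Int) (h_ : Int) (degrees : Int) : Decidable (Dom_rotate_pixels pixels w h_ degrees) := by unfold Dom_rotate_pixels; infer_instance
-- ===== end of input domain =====

-- B re-implements the 90°/270° rotations as a matrix transform (reshape into rows, transpose via zip, flatten)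
-- instead of A's per-pixel index formulas; objective: idiomatic, same cost. Equality of the RETURN value only.

-- ===== PORT A =====
def rotate_pixels (pixels : List Int) (w : Int) (h_ : Int) (degrees : Int) : List Int × Int × Int :=
  let d := PySem.Int.mod degrees 360
  if d = 0 then (pixels, w, h_)
  else if d = 90 then
    let new_w := h_
    let new_h := w
    let new := (PySem.List.pyRange 0 new_h 1).flatMap (fun ny =>
      (PySem.List.pyRange 0 new_w 1).map (fun nx =>
        PySem.List.pyGetD pixels ((h_ - 1 - nx) * w + ny) 0))
    (new, new_w, new_h)
  else if d = 180 then (pixels.reverse, w, h_)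
  else if d = 270 then
    let new_w := h_
    let new_h := w
    let new := (PySem.List.pyRange 0 new_h 1).flatMap (fun ny =>
      (PySem.List.pyRange 0 new_w 1).map (fun nx =>
        PySem.List.pyGetD pixels (nx * w + (w - 1 - ny)) 0))
    (new, new_w, new_h)
  else (pixels, w, h_)

-- ===== PORT B =====
-- faithful model of Python's variadic zip(*rows): [] for zip(); else truncate to the shortest row
def pyZipStar (rows : List (List Int)) : List (List Int) :=
  match rows with
  | [] => []
  | r :: rs =>
    let n := rs.foldl (fun m t => min m t.length) r.length
    (List.range n).map (fun i => (r :: rs).map (fun t => t.getD i 0))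

def rotate_pixels_alt (pixels : List Int) (w : Int) (h_ : Int) (degrees : Int) : List Int × Int × Int :=
  let d := PySem.Int.mod degrees 360
  if d = 0 then (pixels, w, h_)
  else if d = 180 then (pixels.reverse, w, h_)
  else if d = 90 ∨ d = 270 then
    let rows := (PySem.List.pyRange 0 h_ 1).map (fun r =>
      PySem.List.slice pixels (some (r * w)) (some ((r + 1) * w)))
    if d = 90 then ((pyZipStar rows.reverse).flatMap id, h_, w)
    else ((pyZipStar rows).reverse.flatMap id, h_, w)
  else (pixels, w, h_)

-- ===== PRECONDITION & SPEC =====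
-- Pre_ excludes 90°/270° calls whose shape is inconsistent (negative w or h, or fewer than w*h pixels):
-- there A either raises IndexError (too few pixels) or returns an accidental empty list from an empty
-- range over a negative dimension, while B's row-slicing returns the clamped reshape.
def Pre_rotate_pixels (pixels : List Int) (w : Int) (h_ : Int) (degrees : Int) : Prop :=
  (PySem.Int.mod degrees 360 = 90 ∨ PySem.Int.mod degrees 360 = 270) →
    0 ≤ w ∧ 0 ≤ h_ ∧ w * h_ ≤ pixels.length

instance (pixels : List Int) (w : Int) (h_ : Int) (degrees : Int) : Decidable (Pre_rotate_pixels pixels w h_ degrees) := by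
  unfold Pre_rotate_pixels; infer_instance

def pvWitness_rotate_pixels : List Int × Int × Int × Int := ([1, 2, 3, 4, 5, 6], 3, 2, 90)

def Spec_rotate_pixels (pixels : List Int) (w : Int) (h_ : Int) (degrees : Int) (out : List Int × Int × Int) : Prop := out = rotate_pixels_alt pixels w h_ degrees
instance (pixels : List Int) (w : Int) (h_ : Int) (degrees : Int) (out : List Int × Int × Int) : Decidable (Spec_rotate_pixels pixels w h_ degrees out) := by unfold Spec_rotate_pixels; infer_instance

-- ===== CLAIM (what is proved, stated in full; the proofs are below) =====
def Claim_equal_rotate_pixels : Prop := ∀ (pixels : List Int) (w : Int) (h_ : Int) (degrees : Int), Dom_rotate_pixels pixels w h_ degrees → Pre_rotate_pixels pixels w h_ degrees → Spec_rotate_pixels pixels w h_ degrees (rotate_pixels pixels w h_ degrees)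

-- ===== LEMMAS AND PROOFS =====

lemma foldl_min_const {W : Nat} (rs : List (List Int)) (h : ∀ t ∈ rs, t.length = W) :
    rs.foldl (fun m t => min m t.length) W = W := by
  induction rs with
  | nil => rfl
  | cons t ts ih =>
    simp only [List.foldl_cons, h t (by simp), min_self]
    exact ih (fun s hs => h s (by simp [hs]))

lemma pyZipStar_uniform (rows : List (List Int)) (W : Nat) (hne : rows ≠ [])
    (hlen : ∀ t ∈ rows, t.length = W) :
    pyZipStar rows = (List.range W).map (fun i => rows.map (fun t => t.getD i 0)) := by
  cases rows with
  | nil => exact absurd rfl hne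
  | cons r rs =>
    have hr : r.length = W := hlen r (by simp)
    simp only [pyZipStar]
    rw [hr, foldl_min_const rs (fun t ht => hlen t (by simp [ht]))]

lemma getD_take_drop (xs : List Int) (a i W : Nat) (hi : i < W) :
    ((xs.drop a).take W).getD i 0 = xs.getD (a + i) 0 := by
  simp [List.getD_eq_getElem?_getD, List.getElem?_drop, hi]

lemma range_reverse (n : Nat) :
    (List.range n).reverse = (List.range n).map (fun i => n - 1 - i) := by
  apply List.ext_getElem
  · simp
  · intro i h1 h2
    simp only [List.getElem_reverse, List.length_range,
      List.getElem_range, List.getElem_map]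

lemma slice_row (xs : List Int) (r W : Nat) :
    PySem.List.slice xs (some ((r : Int) * (W : Int))) (some (((r : Int) + 1) * (W : Int)))
      = (xs.drop (r * W)).take W := by
  have h1 : ((r : Int) * (W : Int)) = (((r * W : Nat) : Int)) := by push_cast; ring
  have h2 : (((r : Int) + 1) * (W : Int)) = (((r * W : Nat) : Int) + ((W : Nat) : Int)) := by
    push_cast; ring
  rw [h1, h2, PySem.List.slice_natCast_add]

-- B's rows, after rewriting the range and the slices
lemma rows_eq (pixels : List Int) (W H : Nat) :
    ((PySem.List.pyRange 0 (H : Int) 1).map (fun r =>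
        PySem.List.slice pixels (some (r * (W : Int))) (some ((r + 1) * (W : Int)))))
      = (List.range H).map (fun r => (pixels.drop (r * W)).take W) := by
  rw [PySem.List.pyRange_zero, List.map_map]
  exact List.map_congr_left (fun r _ => slice_row pixels r W)

lemma row_len (pixels : List Int) (W H r : Nat) (hr : r < H) (hlen : W * H ≤ pixels.length) :
    ((pixels.drop (r * W)).take W).length = W := by
  have h1 : r * W + W ≤ W * H := by nlinarith
  simp only [List.length_take, List.length_drop]
  omega

-- A's 90° comprehension in Nat form
lemma a90_eq (pixels : List Int) (W H : Nat) :
    ((PySem.List.pyRange 0 (W : Int) 1).flatMap (fun ny =>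
        (PySem.List.pyRange 0 (H : Int) 1).map (fun nx =>
          PySem.List.pyGetD pixels (((H : Int) - 1 - nx) * (W : Int) + ny) 0)))
      = (List.range W).flatMap (fun ny =>
          (List.range H).map (fun nx => pixels.getD ((H - 1 - nx) * W + ny) 0)) := by
  rw [PySem.List.pyRange_zero, PySem.List.pyRange_zero, List.flatMap_map]
  apply List.flatMap_congr
  intro ny _
  rw [List.map_map]
  apply List.map_congr_left
  intro nx hnx
  simp only [List.mem_range] at hnx
  have hcast : ((H : Int) - 1 - (nx : Int)) * (W : Int) + (ny : Int)
      = (((H - 1 - nx) * W + ny : Nat) : Int) := by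
    have h1 : ((H - 1 - nx : Nat) : Int) = (H : Int) - 1 - (nx : Int) := by omega
    push_cast [h1]
    try ring
  rw [Function.comp_apply, hcast, PySem.List.pyGetD_natCast]

-- A's 270° comprehension in Nat form (needs ny < W for the cast of w - 1 - ny)
lemma a270_eq (pixels : List Int) (W H : Nat) :
    ((PySem.List.pyRange 0 (W : Int) 1).flatMap (fun ny =>
        (PySem.List.pyRange 0 (H : Int) 1).map (fun nx =>
          PySem.List.pyGetD pixels (nx * (W : Int) + ((W : Int) - 1 - ny)) 0)))
      = (List.range W).flatMap (fun ny =>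
          (List.range H).map (fun nx => pixels.getD (nx * W + (W - 1 - ny)) 0)) := by
  rw [PySem.List.pyRange_zero, PySem.List.pyRange_zero, List.flatMap_map]
  apply List.flatMap_congr
  intro ny hny
  simp only [List.mem_range] at hny
  rw [List.map_map]
  apply List.map_congr_left
  intro nx _
  have hcast : (nx : Int) * (W : Int) + ((W : Int) - 1 - (ny : Int))
      = ((nx * W + (W - 1 - ny) : Nat) : Int) := by
    have h1 : ((W - 1 - ny : Nat) : Int) = (W : Int) - 1 - (ny : Int) := by omega
    push_cast [h1]
    try ring
  rw [Function.comp_apply, hcast, PySem.List.pyGetD_natCast]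

lemma b90_eq (pixels : List Int) (W H : Nat) (hlen : W * H ≤ pixels.length) :
    (pyZipStar ((List.range H).map (fun r => (pixels.drop (r * W)).take W)).reverse).flatten
      = (List.range W).flatMap (fun ny =>
          (List.range H).map (fun nx => pixels.getD ((H - 1 - nx) * W + ny) 0)) := by
  rcases Nat.eq_zero_or_pos H with hH | hH
  · subst hH; simp [pyZipStar]
  · have hne : ((List.range H).map (fun r => (pixels.drop (r * W)).take W)).reverse ≠ [] := by
      simp; omega
    rw [pyZipStar_uniform _ W hne (by
      intro t ht
      rw [List.mem_reverse, List.mem_map] at ht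
      obtain ⟨r, hr, rfl⟩ := ht
      exact row_len pixels W H r (List.mem_range.mp hr) hlen)]
    rw [← List.flatMap_def]
    apply List.flatMap_congr
    intro ny hny
    simp only [List.mem_range] at hny
    rw [← List.map_reverse, range_reverse, List.map_map, List.map_map]
    apply List.map_congr_left
    intro nx _
    simp only [Function.comp_apply]
    exact getD_take_drop pixels ((H - 1 - nx) * W) ny W hny

lemma b270_eq (pixels : List Int) (W H : Nat) (hlen : W * H ≤ pixels.length) :
    (pyZipStar ((List.range H).map (fun r => (pixels.drop (r * W)).take W))).reverse.flatten
      = (List.range W).flatMap (fun ny =>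
          (List.range H).map (fun nx => pixels.getD (nx * W + (W - 1 - ny)) 0)) := by
  rcases Nat.eq_zero_or_pos H with hH | hH
  · subst hH; simp [pyZipStar]
  · have hne : ((List.range H).map (fun r => (pixels.drop (r * W)).take W)) ≠ [] := by
      simp; omega
    rw [pyZipStar_uniform _ W hne (by
      intro t ht
      rw [List.mem_map] at ht
      obtain ⟨r, hr, rfl⟩ := ht
      exact row_len pixels W H r (List.mem_range.mp hr) hlen)]
    rw [← List.map_reverse, range_reverse, List.map_map, ← List.flatMap_def]
    apply List.flatMap_congr
    intro ny hny
    simp only [List.mem_range] at hny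
    rw [Function.comp_apply, List.map_map]
    apply List.map_congr_left
    intro nx _
    simp only [Function.comp_apply]
    exact getD_take_drop pixels (nx * W) (W - 1 - ny) W (by omega)

-- ===== VERDICT (by name: the statement is the Claim_ definition above) =====
theorem rotate_pixels_spec : Claim_equal_rotate_pixels := by
  intro pixels w h_ degrees _ hpre
  unfold Spec_rotate_pixels rotate_pixels rotate_pixels_alt
  by_cases h0 : PySem.Int.mod degrees 360 = 0
  · simp only [h0]; norm_num
  · by_cases h180 : PySem.Int.mod degrees 360 = 180
    · simp only [h180]; norm_num
    · by_cases h90 : PySem.Int.mod degrees 360 = 90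
      · obtain ⟨hw, hh, hwh⟩ := hpre (Or.inl h90)
        lift w to Nat using hw with W
        lift h_ to Nat using hh with H
        simp only [h90]
        norm_num
        rw [rows_eq pixels W H, a90_eq pixels W H,
          b90_eq pixels W H (by exact_mod_cast hwh)]
      · by_cases h270 : PySem.Int.mod degrees 360 = 270
        · obtain ⟨hw, hh, hwh⟩ := hpre (Or.inr h270)
          lift w to Nat using hw with W
          lift h_ to Nat using hh with H
          simp only [h270]
          norm_num
          rw [rows_eq pixels W H, a270_eq pixels W H,
            b270_eq pixels W H (by exact_mod_cast hwh)]
        · have hor : ¬(PySem.Int.mod degrees 360 = 90 ∨ PySem.Int.mod degrees 360 = 270) := by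
            tauto
          simp only [if_neg h0, if_neg h90, if_neg h180, if_neg h270, if_neg hor]
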